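-- pv_equiv track=rewrite | github.com/typ49/Advent-of-code | AOC-2023/day-03/day3.py | findPosOfSpecialCharacter
-- ===== SOURCE A (Python) =====
-- def findPosOfSpecialCharacter(matrix, specialCharacters):
--     """
--     Finds all the positions of the special characters in a matrix.
--
--     Args:
--         (tab 2D) matrix : a matrix
--         (list) specialCharacter : a list of specialCharacter
--
--     Returns:
--         the position of the special char in the matrix
--     """
--     posOfSpecialCharacter = {}
--     for specialCharacter in specialCharacters:
--         posOfSpecialCharacter[specialCharacter] = []
--         for line in range(len(matrix)):
--             for Character in range(len(matrix[line])):
--                 if matrix[line][Character] == specialCharacter: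
--                     posOfSpecialCharacter[specialCharacter].append((line, Character))
--     return posOfSpecialCharacter
-- ===== SOURCE B (Python) =====
-- def findPosOfSpecialCharacter(matrix, specialCharacters):
--     """One indexing pass over the matrix, then one lookup per special character."""
--     index = {}
--     for i, row in enumerate(matrix):
--         for j, v in enumerate(row):
--             index.setdefault(v, []).append((i, j))
--     return {ch: index.get(ch, []) for ch in specialCharacters}
-- ===== Notes on version B (the rewrite author's own statement) =====
-- stated objective: faster
-- what changed: B replaces A's full matrix scan per special character with a single row-major pass that groups all positions by character into a dict, followed by one O(1) lookup per special character.
import Mathlib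
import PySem

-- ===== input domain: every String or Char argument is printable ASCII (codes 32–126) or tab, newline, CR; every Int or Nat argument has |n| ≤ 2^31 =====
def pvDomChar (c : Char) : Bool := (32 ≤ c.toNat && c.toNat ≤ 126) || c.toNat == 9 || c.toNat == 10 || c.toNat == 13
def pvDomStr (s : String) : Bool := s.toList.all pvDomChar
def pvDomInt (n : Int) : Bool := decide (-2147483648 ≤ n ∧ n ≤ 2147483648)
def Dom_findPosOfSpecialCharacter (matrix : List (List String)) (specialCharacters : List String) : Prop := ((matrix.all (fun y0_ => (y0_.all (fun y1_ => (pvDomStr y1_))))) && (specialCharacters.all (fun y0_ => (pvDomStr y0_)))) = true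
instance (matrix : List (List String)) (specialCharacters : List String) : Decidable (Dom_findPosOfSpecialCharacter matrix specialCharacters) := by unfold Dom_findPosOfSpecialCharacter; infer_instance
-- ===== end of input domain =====

-- B builds one character→positions index in a single pass over the matrix instead of rescanning the whole matrix once per special character (objective: faster).

-- ===== PORT A =====
def findPosOfSpecialCharacter (matrix : List (List String)) (specialCharacters : List String) : List (String × List (Int × Int)) :=
  (specialCharacters.foldl (fun d specialCharacter =>
    (PySem.List.pyRange 0 (PySem.List.len matrix) 1).foldl (fun d line =>
      (PySem.List.pyRange 0 (PySem.List.len (PySem.List.pyGetD matrix line [])) 1).foldl (fun d c =>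
        if PySem.List.pyGetD (PySem.List.pyGetD matrix line []) c "" == specialCharacter
        then d.modify specialCharacter [] (· ++ [(line, c)])
        else d) d) (d.insert specialCharacter [])) PySem.Dict.empty).items

-- ===== PORT B =====
def pvIndex (matrix : List (List String)) : PySem.Dict String (List (Int × Int)) :=
  (PySem.List.enumerate matrix).foldl (fun d p =>
    (PySem.List.enumerate p.2).foldl (fun d q =>
      d.modify q.2 [] (· ++ [(p.1, q.1)])) d) PySem.Dict.empty

def findPosOfSpecialCharacter_alt (matrix : List (List String)) (specialCharacters : List String) : List (String × List (Int × Int)) :=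
  (specialCharacters.foldl (fun res ch => res.insert ch ((pvIndex matrix).getD ch [])) PySem.Dict.empty).items

-- ===== PRECONDITION & SPEC =====
def Spec_findPosOfSpecialCharacter (matrix : List (List String)) (specialCharacters : List String) (out : List (String × List (Int × Int))) : Prop := out = findPosOfSpecialCharacter_alt matrix specialCharacters
instance (matrix : List (List String)) (specialCharacters : List String) (out : List (String × List (Int × Int))) : Decidable (Spec_findPosOfSpecialCharacter matrix specialCharacters out) := by unfold Spec_findPosOfSpecialCharacter; infer_instance

-- ===== CLAIM (what is proved, stated in full; the proofs are below) =====
def Claim_equal_findPosOfSpecialCharacter : Prop := ∀ (matrix : List (List String)) (specialCharacters : List String), Dom_findPosOfSpecialCharacter matrix specialCharacters → Spec_findPosOfSpecialCharacter matrix specialCharacters (findPosOfSpecialCharacter matrix specialCharacters)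

-- ===== LEMMAS AND PROOFS =====

-- the row-major (character, position) pairs of the matrix
def pvPairs (matrix : List (List String)) : List (String × (Int × Int)) :=
  (PySem.List.enumerate matrix).flatMap (fun p =>
    (PySem.List.enumerate p.2).map (fun q => (q.2, (p.1, q.1))))

theorem insert_insert_self {κ ν : Type} [BEq κ] [LawfulBEq κ] (d : PySem.Dict κ ν) (k : κ) (v w : ν) :
    (d.insert k v).insert k w = d.insert k w := by
  apply PySem.Dict.ext
  have hc : (d.insert k v).contains k = true := PySem.Dict.contains_insert_self d k v
  by_cases h : d.contains k = true
  · rw [PySem.Dict.items_insert_of_contains _ _ hc, PySem.Dict.items_insert_of_contains _ _ h,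
        PySem.Dict.items_insert_of_contains _ _ h, List.map_map]
    apply List.map_congr_left
    intro p _
    by_cases hp : (p.1 == k) = true <;> simp [hp]
  · have h' : d.contains k = false := by simpa using h
    rw [PySem.Dict.items_insert_of_contains _ _ hc,
        PySem.Dict.items_insert_of_not_contains _ _ h',
        PySem.Dict.items_insert_of_not_contains _ _ h', List.map_append]
    have hmem : ∀ p ∈ d.items, (p.1 == k) = false := by
      intro p hp
      by_contra hcon
      exact h (List.any_eq_true.mpr ⟨p, hp, by simpa using hcon⟩)
    have h1 : d.items.map (fun p => if (p.1 == k) = true then (k, w) else p) = d.items := by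
      conv_rhs => rw [← List.map_id d.items]
      apply List.map_congr_left
      intro p hp
      simp [hmem p hp]
    simp [h1]

theorem pvIndex_eq (matrix : List (List String)) :
    pvIndex matrix = (pvPairs matrix).foldl (fun d pr => d.modify pr.1 [] (· ++ [pr.2])) PySem.Dict.empty := by
  simp [pvIndex, pvPairs, List.foldl_flatMap, List.foldl_map]

theorem pvIndex_getD (matrix : List (List String)) (ch : String) :
    (pvIndex matrix).getD ch [] = ((pvPairs matrix).filter (·.1 == ch)).map (·.2) := by
  rw [pvIndex_eq, PySem.Dict.getD_foldl_modify_append]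
  simp [PySem.Dict.getD_empty]

theorem single_key_fold (ch : String) (l : List (String × (Int × Int)))
    (d : PySem.Dict String (List (Int × Int))) (acc : List (Int × Int)) :
    l.foldl (fun d pr => if pr.1 == ch then d.modify ch [] (· ++ [pr.2]) else d) (d.insert ch acc)
      = d.insert ch (acc ++ (l.filter (·.1 == ch)).map (·.2)) := by
  induction l generalizing acc with
  | nil => simp
  | cons pr l ih =>
    rw [List.foldl_cons]
    by_cases h : (pr.1 == ch) = true
    · rw [if_pos h,
        show (d.insert ch acc).modify ch [] (· ++ [pr.2]) = d.insert ch (acc ++ [pr.2]) from by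
          simp [PySem.Dict.modify, PySem.Dict.getD_insert_self, insert_insert_self],
        ih]
      simp [h]
    · rw [if_neg h, ih]
      simp [h]

theorem a_step_eq (matrix : List (List String)) (ch : String)
    (d : PySem.Dict String (List (Int × Int))) :
    (PySem.List.pyRange 0 (PySem.List.len matrix) 1).foldl (fun d line =>
      (PySem.List.pyRange 0 (PySem.List.len (PySem.List.pyGetD matrix line [])) 1).foldl (fun d c =>
        if PySem.List.pyGetD (PySem.List.pyGetD matrix line []) c "" == ch
        then d.modify ch [] (· ++ [(line, c)])
        else d) d) (d.insert ch [])
      = d.insert ch (((pvPairs matrix).filter (·.1 == ch)).map (·.2)) := by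
  have h1 : (PySem.List.pyRange 0 (PySem.List.len matrix) 1).foldl (fun d line =>
      (PySem.List.pyRange 0 (PySem.List.len (PySem.List.pyGetD matrix line [])) 1).foldl (fun d c =>
        if PySem.List.pyGetD (PySem.List.pyGetD matrix line []) c "" == ch
        then d.modify ch [] (· ++ [(line, c)])
        else d) d) (d.insert ch [])
      = (pvPairs matrix).foldl (fun d pr => if pr.1 == ch then d.modify ch [] (· ++ [pr.2]) else d) (d.insert ch []) := by
    rw [pvPairs, List.foldl_flatMap, PySem.List.enumerate_eq_map_pyRange matrix ([] : List String), List.foldl_map]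
    apply PySem.List.foldl_congr_mem
    intro acc x _
    rw [PySem.List.enumerate_eq_map_pyRange (PySem.List.pyGetD matrix x []) "", List.foldl_map, List.foldl_map]
  rw [h1, single_key_fold]
  simp

-- ===== VERDICT (by name: the statement is the Claim_ definition above) =====
theorem findPosOfSpecialCharacter_spec : Claim_equal_findPosOfSpecialCharacter := by
  intro matrix specialCharacters _
  unfold Spec_findPosOfSpecialCharacter findPosOfSpecialCharacter findPosOfSpecialCharacter_alt
  congr 1
  apply PySem.List.foldl_congr_mem
  intro d ch _
  rw [a_step_eq, pvIndex_getD]
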